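-- pv_equiv track=rewrite | github.com/hed-standard/hed-python | hedtools/hed/tools/hed_string_util.py | split_hed_string
-- ===== SOURCE A (Python) =====
-- def split_hed_string(hed_string):
--     """Takes a hed string and splits it into delimiters and tags
--
--         Note: This does not validate tags in any form.
--
--     Parameters
--     ----------
--         hed_string: string
--             the hed string to split
--     Returns
--     -------
--     list of tuples.
--         each tuple: (is_hed_tag, (start_pos, end_pos))
--         is_hed_tag: bool
--             This is a (possible) hed tag if true, delimiter if not
--         start_pos: int
--             index of start of string in hed_string
--         end_pos: int
--             index of end of string in hed_string
--     """
--     tag_delimiters = ",()~"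
--     current_spacing = 0
--     inside_d = True
--     result_positions = []
--     start_pos = None
--     last_end_pos = 0
--     for i, char in enumerate(hed_string):
--         if char == " ":
--             current_spacing += 1
--             continue
--
--         if char in tag_delimiters:
--             if not inside_d:
--                 inside_d = True
--                 if start_pos is not None:
--                     last_end_pos = i - current_spacing
--                     # view_string = hed_string[start_pos: last_end_pos]
--                     result_positions.append((True, (start_pos, last_end_pos)))
--                     current_spacing = 0
--                     start_pos = None
--             continue
--
--         # If we have a current delimiter, end it here.
--         if inside_d and last_end_pos is not None:
--             # view_string = hed_string[last_end_pos: i]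
--             if last_end_pos != i:
--                 result_positions.append((False, (last_end_pos, i)))
--             last_end_pos = None
--
--         current_spacing = 0
--         inside_d = False
--         if start_pos is None:
--             start_pos = i
--
--     if last_end_pos is not None and len(hed_string) != last_end_pos:
--         # view_string = hed_string[last_end_pos: len(hed_string)]
--         result_positions.append((False, (last_end_pos, len(hed_string))))
--     if start_pos is not None:
--         # view_string = hed_string[start_pos: len(hed_string)]
--         result_positions.append((True, (start_pos, len(hed_string) - current_spacing)))
--         if current_spacing:
--             result_positions.append((False, (len(hed_string) - current_spacing, len(hed_string))))
--
--     # debug_result_strings = [hed_string[startpos:endpos] for (is_hed_string, (startpos, endpos)) in result_positions]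
--     return result_positions
-- ===== SOURCE B (Python) =====
-- def split_hed_string(hed_string):
--     """Two-pass version: collect maximal non-delimiter runs, then shape them
--     into trimmed tag spans and delimiter/space gap spans."""
--     runs = []
--     current = None  # (start_index, list of chars of the run)
--     for idx, ch in enumerate(hed_string):
--         if ch in ",()~":
--             if current is not None:
--                 runs.append(current)
--                 current = None
--         elif current is None:
--             current = (idx, [ch])
--         else:
--             current[1].append(ch)
--     if current is not None:
--         runs.append(current)
--
--     result = []
--     cursor = 0
--     n = len(hed_string)
--     for start0, chars in runs:
--         seg = "".join(chars)
--         lead = len(seg) - len(seg.lstrip(" "))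
--         kept = len(seg.rstrip(" "))
--         if lead >= kept:
--             continue  # run is all spaces: absorbed into the surrounding gap
--         start, end = start0 + lead, start0 + kept
--         if start != cursor:
--             result.append((False, (cursor, start)))
--         result.append((True, (start, end)))
--         cursor = end
--     if cursor != n:
--         result.append((False, (cursor, n)))
--     return result
-- ===== Notes on version B (the rewrite author's own statement) =====
-- stated objective: alternative
-- what changed: Replaces A's single-pass six-variable state machine (spacing counter, inside-delimiter flag, pending start/end positions, post-loop fixups) by a two-pass decomposition: first collect the maximal non-delimiter runs, then shape each run into a trimmed tag span plus cursor-tracked gap spans.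
import Mathlib
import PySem

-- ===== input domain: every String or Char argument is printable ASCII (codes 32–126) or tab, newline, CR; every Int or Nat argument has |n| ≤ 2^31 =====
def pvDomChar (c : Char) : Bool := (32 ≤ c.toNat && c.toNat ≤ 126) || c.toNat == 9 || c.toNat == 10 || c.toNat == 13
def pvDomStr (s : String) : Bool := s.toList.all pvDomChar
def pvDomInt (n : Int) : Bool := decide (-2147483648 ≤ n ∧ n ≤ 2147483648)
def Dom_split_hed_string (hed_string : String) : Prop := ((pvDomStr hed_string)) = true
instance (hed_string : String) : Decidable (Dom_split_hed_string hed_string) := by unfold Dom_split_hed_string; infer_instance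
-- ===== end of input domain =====

-- B replaces A's six-variable single-pass state machine by a two-pass decomposition
-- (collect maximal non-delimiter runs, then shape each run into trimmed tag spans and gap
-- spans); objective: alternative (same cost, clearer structure). Equivalence of the return
-- value is proved for all strings.

-- ===== PORT A =====
-- `char in ",()~"`
def pvIsDelim (c : Char) : Bool := c = ',' || c = '(' || c = ')' || c = '~'

-- the for-loop of A: state (current_spacing, inside_d, result_positions, start_pos, last_end_pos),
-- index i carried explicitly (enumerate)
def pvALoop : List Char → Int → Int → Bool → List (Bool × (Int × Int)) → Option Int → Option Int →
    Int × Bool × List (Bool × (Int × Int)) × Option Int × Option Int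
  | [], _, c, ind, res, sp, lep => (c, ind, res, sp, lep)
  | ch :: rest, i, c, ind, res, sp, lep =>
    if ch = ' ' then pvALoop rest (i+1) (c+1) ind res sp lep
    else if pvIsDelim ch then
      if !ind then
        match sp with
        | some s => pvALoop rest (i+1) 0 true (res ++ [(true, (s, i - c))]) none (some (i - c))
        | none => pvALoop rest (i+1) c true res none lep
      else pvALoop rest (i+1) c ind res sp lep
    else
      -- tag character: `if inside_d and last_end_pos is not None: …`
      match ind, lep with
      | true, some l =>
        pvALoop rest (i+1) 0 false (if l ≠ i then res ++ [(false, (l, i))] else res)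
          (if sp.isNone then some i else sp) none
      | _, _ =>
        pvALoop rest (i+1) 0 false res (if sp.isNone then some i else sp) lep

-- A's code after the loop
def pvAFinish (n : Int) (st : Int × Bool × List (Bool × (Int × Int)) × Option Int × Option Int) :
    List (Bool × (Int × Int)) :=
  match st with
  | (c, _, res, sp, lep) =>
    let res2 := match lep with
      | some l => if n ≠ l then res ++ [(false, (l, n))] else res
      | none => res
    match sp with
    | some s =>
      if c ≠ 0 then res2 ++ [(true, (s, n - c))] ++ [(false, (n - c, n))]
      else res2 ++ [(true, (s, n - c))]
    | none => res2

def split_hed_string (hed_string : String) : List (Bool × (Int × Int)) :=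
  pvAFinish (hed_string.toList.length : Int)
    (pvALoop hed_string.toList 0 0 true [] none (some 0))

-- ===== PORT B =====
-- pass 1 of Source B: maximal non-delimiter runs, `current` = open run (start, chars so far)
def pvBRuns : List Char → Int → Option (Int × List Char) → List (Int × List Char) →
    List (Int × List Char)
  | [], _, cur, runs => match cur with | some r => runs ++ [r] | none => runs
  | ch :: rest, i, cur, runs =>
    if pvIsDelim ch then
      match cur with
      | some r => pvBRuns rest (i+1) none (runs ++ [r])
      | none => pvBRuns rest (i+1) none runs
    else
      match cur with
      | none => pvBRuns rest (i+1) (some (i, [ch])) runs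
      | some (a, seg) => pvBRuns rest (i+1) (some (a, seg ++ [ch])) runs

-- `len(seg) - len(seg.lstrip(" "))`
def pvLead (seg : List Char) : Int :=
  (seg.length : Int) - ((seg.dropWhile (· = ' ')).length : Int)
-- `len(seg.rstrip(" "))`
def pvKept (seg : List Char) : Int := ((seg.reverse.dropWhile (· = ' ')).length : Int)

-- pass 2 of Source B: shape the runs with a cursor, then the trailing gap
def pvBShape (n : Int) : List (Int × List Char) → Int → List (Bool × (Int × Int))
  | [], cursor => if cursor ≠ n then [(false, (cursor, n))] else []
  | (a, seg) :: rest, cursor =>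
    if pvKept seg ≤ pvLead seg then pvBShape n rest cursor
    else
      (if a + pvLead seg ≠ cursor then [(false, (cursor, a + pvLead seg))] else []) ++
      (true, (a + pvLead seg, a + pvKept seg)) :: pvBShape n rest (a + pvKept seg)

def split_hed_string_alt (hed_string : String) : List (Bool × (Int × Int)) :=
  pvBShape (hed_string.toList.length : Int) (pvBRuns hed_string.toList 0 none []) 0

-- ===== PRECONDITION & SPEC =====
def Spec_split_hed_string (hed_string : String) (out : List (Bool × (Int × Int))) : Prop := out = split_hed_string_alt hed_string
instance (hed_string : String) (out : List (Bool × (Int × Int))) : Decidable (Spec_split_hed_string hed_string out) := by unfold Spec_split_hed_string; infer_instance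

-- ===== CLAIM (what is proved, stated in full; the proofs are below) =====
def Claim_equal_split_hed_string : Prop := ∀ (hed_string : String), Dom_split_hed_string hed_string → Spec_split_hed_string hed_string (split_hed_string hed_string)

-- ===== LEMMAS AND PROOFS =====

-- pvBRuns only ever appends to the accumulator
theorem pvBRuns_acc (cs : List Char) : ∀ (i : Int) cur runs,
    pvBRuns cs i cur runs = runs ++ pvBRuns cs i cur [] := by
  induction cs with
  | nil => intro i cur runs; cases cur <;> simp [pvBRuns]
  | cons ch rest ih =>
    intro i cur runs
    match cur with
    | none =>
      by_cases hd : pvIsDelim ch = true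
      · simp only [pvBRuns, hd, if_true]; exact ih _ _ _
      · simp only [pvBRuns, hd, if_false, Bool.false_eq_true]; exact ih _ _ _
    | some (a, seg) =>
      by_cases hd : pvIsDelim ch = true
      · simp only [pvBRuns, hd, if_true, List.nil_append]
        rw [ih (i+1) none (runs ++ [(a, seg)]), ih (i+1) none [(a, seg)]]
        simp
      · simp only [pvBRuns, hd, if_false, Bool.false_eq_true]; exact ih _ _ _

-- an open run stays the head run (possibly extended) of the remaining output
theorem pvBRuns_head (cs : List Char) : ∀ (i a : Int) (seg : List Char),
    ∃ ext rest', pvBRuns cs i (some (a, seg)) [] = (a, seg ++ ext) :: rest' := by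
  induction cs with
  | nil => intro i a seg; exact ⟨[], [], by simp [pvBRuns]⟩
  | cons ch rest ih =>
    intro i a seg
    by_cases hd : pvIsDelim ch = true
    · refine ⟨[], pvBRuns rest (i+1) none [], ?_⟩
      simp [pvBRuns, hd, pvBRuns_acc rest (i+1) none [(a, seg)]]
    · obtain ⟨ext, rest', h⟩ := ih (i+1) a (seg ++ [ch])
      exact ⟨[ch] ++ ext, rest', by simp [pvBRuns, hd, h]⟩

theorem pvLead_append {seg : List Char} (ext : List Char)
    (h : seg.dropWhile (· = ' ') ≠ []) : pvLead (seg ++ ext) = pvLead seg := by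
  unfold pvLead
  rw [List.dropWhile_append]
  simp [List.isEmpty_iff, h]

theorem pvKept_append_space (seg : List Char) : pvKept (seg ++ [' ']) = pvKept seg := by
  unfold pvKept
  simp

theorem pvKept_append_nonspace {ch : Char} (seg : List Char) (h : ¬ ch = ' ') :
    pvKept (seg ++ [ch]) = (seg.length : Int) + 1 := by
  unfold pvKept
  simp [h]

theorem pvLead_allspace_append {ch : Char} {seg : List Char}
    (hall : ∀ x ∈ seg, x = ' ') (h : ¬ ch = ' ') :
    pvLead (seg ++ [ch]) = (seg.length : Int) := by
  unfold pvLead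
  rw [List.dropWhile_append]
  have hseg : seg.dropWhile (· = ' ') = [] := by
    rw [List.dropWhile_eq_nil_iff]; intro x hx; simp [hall x hx]
  simp [hseg, List.dropWhile, h]

theorem pvLead_allspace {seg : List Char} (hall : ∀ x ∈ seg, x = ' ') :
    pvLead seg = (seg.length : Int) := by
  unfold pvLead
  have hseg : seg.dropWhile (· = ' ') = [] := by
    rw [List.dropWhile_eq_nil_iff]; intro x hx; simp [hall x hx]
  simp [hseg]

theorem pvKept_allspace {seg : List Char} (hall : ∀ x ∈ seg, x = ' ') : pvKept seg = 0 := by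
  unfold pvKept
  have : seg.reverse.dropWhile (· = ' ') = [] := by
    rw [List.dropWhile_eq_nil_iff]; intro x hx; simp [hall x (List.mem_reverse.mp hx)]
  simp [this]

-- a run containing a non-space character yields a nonempty trimmed span
theorem pvLead_lt_pvKept {seg : List Char} (h : seg.dropWhile (· = ' ') ≠ []) :
    pvLead seg < pvKept seg := by
  obtain ⟨x, d', hxd⟩ : ∃ x d', seg.dropWhile (· = ' ') = x :: d' := by
    cases hcase : seg.dropWhile (· = ' ') with
    | nil => exact absurd hcase h
    | cons y ys => exact ⟨y, ys, rfl⟩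
  have hpx : x ≠ ' ' := by
    have h0 : 0 < (List.dropWhile (fun y => decide (y = ' ')) seg).length := by
      rw [show List.dropWhile (fun y => decide (y = ' ')) seg = x :: d' from hxd]; simp
    have h1 := List.dropWhile_get_zero_not (p := fun y => decide (y = ' ')) seg h0
    simpa [hxd] using h1
  have hmem : x ∈ seg := (List.dropWhile_sublist (l := seg) (p := fun y => decide (y = ' '))).subset
    (by rw [hxd]; exact List.mem_cons_self)
  have hdec : seg = (seg.reverse.dropWhile (· = ' ')).reverse ++ (seg.reverse.takeWhile (· = ' ')).reverse := by
    have h1 : seg.reverse.takeWhile (· = ' ') ++ seg.reverse.dropWhile (· = ' ') = seg.reverse :=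
      List.takeWhile_append_dropWhile
    calc seg = seg.reverse.reverse := by simp
    _ = (seg.reverse.takeWhile (· = ' ') ++ seg.reverse.dropWhile (· = ' ')).reverse := by rw [h1]
    _ = _ := by rw [List.reverse_append]
  set r := (seg.reverse.dropWhile (· = ' ')).reverse with hr
  have hrns : r.dropWhile (· = ' ') ≠ [] := by
    intro hnil
    have hall := List.dropWhile_eq_nil_iff.mp hnil
    rw [hdec] at hmem
    rcases List.mem_append.mp hmem with hm | hm
    · exact hpx (by simpa using hall x hm)
    · have := List.mem_takeWhile_imp (List.mem_reverse.mp hm)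
      exact hpx (by simpa using this)
  have hlead : pvLead seg = pvLead r := by
    conv_lhs => rw [hdec]
    exact pvLead_append _ hrns
  have hkept : pvKept seg = (r.length : Int) := by
    unfold pvKept; rw [hr]; simp
  have hlr : pvLead r < (r.length : Int) := by
    unfold pvLead
    have h1 : 0 < (r.dropWhile (· = ' ')).length := List.length_pos_of_ne_nil hrns
    have hle : (r.dropWhile (· = ' ')).length ≤ r.length := List.length_dropWhile_le _ _
    omega
  omega

-- changing the cursor only changes the leading gap span, as long as the open run has a non-space
theorem pvBShape_cursor (cs : List Char) (n : Int) (i a : Int) (seg : List Char)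
    (h : seg.dropWhile (· = ' ') ≠ []) (L : Int) :
    pvBShape n (pvBRuns cs i (some (a, seg)) []) L
      = (if a + pvLead seg ≠ L then [(false, (L, a + pvLead seg))] else []) ++
        pvBShape n (pvBRuns cs i (some (a, seg)) []) (a + pvLead seg) := by
  obtain ⟨ext, rest', hh⟩ := pvBRuns_head cs i a seg
  have hns : (seg ++ ext).dropWhile (· = ' ') ≠ [] := by
    rw [List.dropWhile_append]
    simp [List.isEmpty_iff, h]
  have hlead := pvLead_append ext h
  have hlk := pvLead_lt_pvKept hns
  have hko : ¬ (pvKept (seg ++ ext) ≤ pvLead seg) := by omega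
  rw [hh]
  simp only [pvBShape, hlead, if_neg hko]
  simp

-- the main invariant: A's loop+finish equals B's runs+shape, for the three reachable
-- state shapes (inside delimiter / delimiter with an open all-space run / inside a tag)
theorem pvMainTriple (cs : List Char) :
    (∀ (n i c L : Int) res, n = i + (cs.length : Int) →
      pvAFinish n (pvALoop cs i c true res none (some L))
        = res ++ pvBShape n (pvBRuns cs i none []) L)
    ∧ (∀ (n i c L a : Int) res (seg : List Char), n = i + (cs.length : Int) →
        (∀ x ∈ seg, x = ' ') → ((seg.length : Int) = i - a) →
      pvAFinish n (pvALoop cs i c true res none (some L))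
        = res ++ pvBShape n (pvBRuns cs i (some (a, seg)) []) L)
    ∧ (∀ (n i c a : Int) res (seg : List Char), n = i + (cs.length : Int) →
        seg.dropWhile (· = ' ') ≠ [] → ((seg.length : Int) = i - a) →
        pvKept seg = (i - a) - c →
      pvAFinish n (pvALoop cs i c false res (some (a + pvLead seg)) none)
        = res ++ pvBShape n (pvBRuns cs i (some (a, seg)) []) (a + pvLead seg)) := by
  induction cs with
  | nil =>
    refine ⟨?_, ?_, ?_⟩
    · intro n i c L res hn
      obtain rfl : n = i := by simp at hn; omega
      simp only [pvALoop, pvBRuns, pvAFinish, pvBShape]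
      by_cases hL : L = n
      · simp [hL]
      · simp [hL, Ne.symm hL]
    · intro n i c L a res seg hn hall hlenseg
      obtain rfl : n = i := by simp at hn; omega
      have hk := pvKept_allspace hall
      have hl := pvLead_allspace hall
      simp only [pvALoop, pvBRuns, pvAFinish, pvBShape, List.nil_append]
      rw [if_pos (show pvKept seg ≤ pvLead seg by omega)]
      by_cases hL : L = n
      · simp [hL]
      · simp [hL, Ne.symm hL]
    · intro n i c a res seg hn hns hlenseg hkept
      obtain rfl : n = i := by simp at hn; omega
      have hlk := pvLead_lt_pvKept hns
      simp only [pvALoop, pvBRuns, pvAFinish, pvBShape, List.nil_append]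
      rw [if_neg (show ¬ (pvKept seg ≤ pvLead seg) by omega)]
      rw [if_neg (show ¬ (a + pvLead seg ≠ a + pvLead seg) from fun hc => hc rfl)]
      rw [show a + pvKept seg = n - c by omega]
      by_cases hc : c = 0
      · simp [hc]
      · simp [hc, show n - c ≠ n by omega]
  | cons ch rest ih =>
    obtain ⟨ih1, ih2, ih3⟩ := ih
    have hstep : ∀ (n i : Int), n = i + (((ch :: rest).length : Nat) : Int) →
        n = (i + 1) + ((rest.length : Nat) : Int) := by
      intro n i h; simp only [List.length_cons] at h; push_cast at h ⊢; omega
    refine ⟨?_, ?_, ?_⟩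
    · -- P1: inside delimiter, no open run
      intro n i c L res hn
      have hn' := hstep n i hn
      by_cases hsp : ch = ' '
      · subst hsp
        have hd : pvIsDelim ' ' = false := by decide
        rw [show pvALoop (' ' :: rest) i c true res none (some L)
              = pvALoop rest (i+1) (c+1) true res none (some L) from by simp [pvALoop]]
        rw [show pvBRuns (' ' :: rest) i none [] = pvBRuns rest (i+1) (some (i, [' '])) [] from by
          simp [pvBRuns, hd]]
        exact ih2 n (i+1) (c+1) L i res [' '] hn' (by intro x hx; simpa using hx)
          (by simp)
      · by_cases hd : pvIsDelim ch = true
        · rw [show pvALoop (ch :: rest) i c true res none (some L)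
                = pvALoop rest (i+1) c true res none (some L) from by simp [pvALoop, hsp, hd]]
          rw [show pvBRuns (ch :: rest) i none [] = pvBRuns rest (i+1) none [] from by
            simp [pvBRuns, hd]]
          exact ih1 n (i+1) c L res hn'
        · have hdf : pvIsDelim ch = false := by simpa using hd
          have hlead1 : pvLead [ch] = 0 := by unfold pvLead; simp [List.dropWhile, hsp]
          have hns1 : ([ch] : List Char).dropWhile (· = ' ') ≠ [] := by
            simp [List.dropWhile, hsp]
          rw [show pvALoop (ch :: rest) i c true res none (some L)
                = pvALoop rest (i+1) 0 false (if L ≠ i then res ++ [(false, (L, i))] else res)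
                    (some i) none from by simp [pvALoop, hsp, hdf]]
          rw [show pvBRuns (ch :: rest) i none [] = pvBRuns rest (i+1) (some (i, [ch])) [] from by
            simp [pvBRuns, hdf]]
          have hih := ih3 n (i+1) 0 i (if L ≠ i then res ++ [(false, (L, i))] else res) [ch] hn'
            hns1 (by simp) (by unfold pvKept; simp [hsp])
          rw [hlead1, add_zero] at hih
          rw [hih, pvBShape_cursor rest n (i+1) i [ch] hns1 L, hlead1, add_zero]
          by_cases hL : L = i
          · simp [hL]
          · simp [hL, Ne.symm hL]
    · -- P3: inside delimiter, open all-space run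
      intro n i c L a res seg hn hall hlenseg
      have hn' := hstep n i hn
      by_cases hsp : ch = ' '
      · subst hsp
        have hd : pvIsDelim ' ' = false := by decide
        rw [show pvALoop (' ' :: rest) i c true res none (some L)
              = pvALoop rest (i+1) (c+1) true res none (some L) from by simp [pvALoop]]
        rw [show pvBRuns (' ' :: rest) i (some (a, seg)) []
              = pvBRuns rest (i+1) (some (a, seg ++ [' '])) [] from by simp [pvBRuns, hd]]
        refine ih2 n (i+1) (c+1) L a res (seg ++ [' ']) hn' ?_ ?_
        · intro x hx
          rcases List.mem_append.mp hx with hm | hm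
          · exact hall x hm
          · simpa using hm
        · simp; omega
      · by_cases hd : pvIsDelim ch = true
        · have hk := pvKept_allspace hall
          have hl := pvLead_allspace hall
          rw [show pvALoop (ch :: rest) i c true res none (some L)
                = pvALoop rest (i+1) c true res none (some L) from by simp [pvALoop, hsp, hd]]
          rw [show pvBRuns (ch :: rest) i (some (a, seg)) []
                = pvBRuns rest (i+1) none [(a, seg)] from by simp [pvBRuns, hd]]
          rw [pvBRuns_acc rest (i+1) none [(a, seg)]]
          simp only [List.singleton_append]
          rw [show pvBShape n ((a, seg) :: pvBRuns rest (i+1) none []) L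
                = pvBShape n (pvBRuns rest (i+1) none []) L from by
            simp only [pvBShape]
            rw [if_pos (show pvKept seg ≤ pvLead seg by omega)]]
          exact ih1 n (i+1) c L res hn'
        · have hdf : pvIsDelim ch = false := by simpa using hd
          have hlead1 : pvLead (seg ++ [ch]) = (seg.length : Int) :=
            pvLead_allspace_append hall hsp
          have hns1 : (seg ++ [ch]).dropWhile (· = ' ') ≠ [] := by
            rw [List.dropWhile_append]
            have hseg : seg.dropWhile (· = ' ') = [] := by
              rw [List.dropWhile_eq_nil_iff]; intro x hx; simp [hall x hx]
            simp [hseg, List.dropWhile, hsp]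
          have hia : a + pvLead (seg ++ [ch]) = i := by rw [hlead1]; omega
          rw [show pvALoop (ch :: rest) i c true res none (some L)
                = pvALoop rest (i+1) 0 false (if L ≠ i then res ++ [(false, (L, i))] else res)
                    (some i) none from by simp [pvALoop, hsp, hdf]]
          rw [show pvBRuns (ch :: rest) i (some (a, seg)) []
                = pvBRuns rest (i+1) (some (a, seg ++ [ch])) [] from by simp [pvBRuns, hdf]]
          have hih := ih3 n (i+1) 0 a (if L ≠ i then res ++ [(false, (L, i))] else res)
            (seg ++ [ch]) hn' hns1 (by simp; omega)
            (by rw [pvKept_append_nonspace seg hsp]; omega)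
          rw [hia] at hih
          rw [hih, pvBShape_cursor rest n (i+1) a (seg ++ [ch]) hns1 L, hia]
          by_cases hL : L = i
          · simp [hL]
          · simp [hL, Ne.symm hL]
    · -- P2: inside a tag
      intro n i c a res seg hn hns hlenseg hkept
      have hn' := hstep n i hn
      by_cases hsp : ch = ' '
      · subst hsp
        have hd : pvIsDelim ' ' = false := by decide
        have hlead1 : pvLead (seg ++ [' ']) = pvLead seg := pvLead_append _ hns
        have hns1 : (seg ++ [' ']).dropWhile (· = ' ') ≠ [] := by
          rw [List.dropWhile_append]
          simp [List.isEmpty_iff, hns]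
        rw [show pvALoop (' ' :: rest) i (c) false res (some (a + pvLead seg)) none
              = pvALoop rest (i+1) (c+1) false res (some (a + pvLead seg)) none from by
          simp [pvALoop]]
        rw [show pvBRuns (' ' :: rest) i (some (a, seg)) []
              = pvBRuns rest (i+1) (some (a, seg ++ [' '])) [] from by simp [pvBRuns, hd]]
        have hih := ih3 n (i+1) (c+1) a res (seg ++ [' ']) hn' hns1
          (by simp; omega) (by rw [pvKept_append_space]; omega)
        rw [hlead1] at hih
        exact hih
      · by_cases hd : pvIsDelim ch = true
        · have hlk := pvLead_lt_pvKept hns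
          rw [show pvALoop (ch :: rest) i c false res (some (a + pvLead seg)) none
                = pvALoop rest (i+1) 0 true (res ++ [(true, (a + pvLead seg, i - c))]) none
                    (some (i - c)) from by simp [pvALoop, hsp, hd]]
          rw [show pvBRuns (ch :: rest) i (some (a, seg)) []
                = pvBRuns rest (i+1) none [(a, seg)] from by simp [pvBRuns, hd]]
          rw [pvBRuns_acc rest (i+1) none [(a, seg)]]
          simp only [List.singleton_append]
          rw [show pvBShape n ((a, seg) :: pvBRuns rest (i+1) none []) (a + pvLead seg)
                = (true, (a + pvLead seg, i - c)) ::
                    pvBShape n (pvBRuns rest (i+1) none []) (i - c) from by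
            simp only [pvBShape]
            rw [if_neg (show ¬ (pvKept seg ≤ pvLead seg) by omega)]
            rw [if_neg (show ¬ (a + pvLead seg ≠ a + pvLead seg) from fun hc => hc rfl)]
            rw [show a + pvKept seg = i - c by omega]
            simp]
          rw [ih1 n (i+1) 0 (i - c) (res ++ [(true, (a + pvLead seg, i - c))]) hn']
          simp
        · have hdf : pvIsDelim ch = false := by simpa using hd
          have hlead1 : pvLead (seg ++ [ch]) = pvLead seg := pvLead_append _ hns
          have hns1 : (seg ++ [ch]).dropWhile (· = ' ') ≠ [] := by
            rw [List.dropWhile_append]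
            simp [List.isEmpty_iff, hns]
          rw [show pvALoop (ch :: rest) i c false res (some (a + pvLead seg)) none
                = pvALoop rest (i+1) 0 false res (some (a + pvLead seg)) none from by
            simp [pvALoop, hsp, hdf]]
          rw [show pvBRuns (ch :: rest) i (some (a, seg)) []
                = pvBRuns rest (i+1) (some (a, seg ++ [ch])) [] from by simp [pvBRuns, hdf]]
          have hih := ih3 n (i+1) 0 a res (seg ++ [ch]) hn' hns1
            (by simp; omega) (by rw [pvKept_append_nonspace seg hsp]; omega)
          rw [hlead1] at hih
          exact hih

-- ===== VERDICT (by name: the statement is the Claim_ definition above) =====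
theorem split_hed_string_spec : Claim_equal_split_hed_string := by
  intro hed_string _
  unfold Spec_split_hed_string
  have h := (pvMainTriple hed_string.toList).1 ((hed_string.toList.length : Int)) 0 0 0 []
    (by simp)
  simpa [split_hed_string, split_hed_string_alt] using h
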